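-- pv_equiv track=rewrite | github.com/Byt-wyze-technology/STTF | src/sttf_core.py | _split_args
-- ===== SOURCE A (Python) =====
-- from typing import Dict, List, Tuple, Any, Optional
--
-- def _split_args(s: str) -> Tuple[str, str]:
--     """Split comma-separated arguments respecting parenthesis depth."""
--     depth = 0
--     for i, ch in enumerate(s):
--         if ch == "(":
--             depth += 1
--         elif ch == ")":
--             depth -= 1
--         elif ch == "," and depth == 0:
--             return s[:i].strip(), s[i+1:].strip()
--     raise ValueError(f"Malformed expression arguments: {s}")
-- ===== SOURCE B (Python) =====
-- def _split_args(s: str):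
--     """Split comma-separated arguments respecting parenthesis depth."""
--     frags = s.split(',')
--     net = 0
--     for k in range(len(frags) - 1):
--         net += frags[k].count('(') - frags[k].count(')')
--         if net == 0:
--             return ','.join(frags[:k + 1]).strip(), ','.join(frags[k + 1:]).strip()
--     raise ValueError(f"Malformed expression arguments: {s}")
-- ===== Notes on version B (the rewrite author's own statement) =====
-- stated objective: alternative
-- what changed: Replaces A's single character-by-character scan carrying a depth counter with a two-phase pass: split the string on the comma character first, then accumulate fragments with a running net parenthesis count and re-join at the first balanced fragment boundary.
import Mathlib
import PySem

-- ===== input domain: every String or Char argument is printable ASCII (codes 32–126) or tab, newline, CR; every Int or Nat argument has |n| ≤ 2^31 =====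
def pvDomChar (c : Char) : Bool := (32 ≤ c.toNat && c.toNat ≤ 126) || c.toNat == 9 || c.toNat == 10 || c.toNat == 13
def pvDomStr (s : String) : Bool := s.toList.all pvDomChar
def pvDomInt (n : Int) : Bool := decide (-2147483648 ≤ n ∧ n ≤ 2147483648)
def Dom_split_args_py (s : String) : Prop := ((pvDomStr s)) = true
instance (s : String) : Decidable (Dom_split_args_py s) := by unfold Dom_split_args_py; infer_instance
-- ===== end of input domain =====

-- B replaces A's single character scan by a two-phase pass: split on the comma character first, then
-- accumulate fragments with a running net parenthesis count to find the top-level comma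
-- (objective: alternative decomposition, same cost). Both raise ValueError on the same inputs.

-- ===== PORT A =====
-- A's loop: enumerate(s) with a depth counter; on a top-level comma return (s[:i].strip(), s[i+1:].strip()).
-- When the loop falls off the end Python raises ValueError; the port returns ([],[]) there (excluded by Pre_).
def splitArgsGoA (cs : List Char) (i : Nat) (depth : Int) : List Char → List Char × List Char
  | [] => ([], [])
  | c :: rest =>
    if c = '(' then splitArgsGoA cs (i+1) (depth+1) rest
    else if c = ')' then splitArgsGoA cs (i+1) (depth-1) rest
    else if c = ',' ∧ depth = 0 then
      (PySem.List.slice cs none (some (i : Int)), PySem.List.slice cs (some ((i : Int)+1)) none)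
    else splitArgsGoA cs (i+1) depth rest

def split_args_py (s : String) : String × String :=
  let cs := s.toList
  let pq := splitArgsGoA cs 0 0 cs
  (String.ofList (PySem.Chars.strip pq.1), String.ofList (PySem.Chars.strip pq.2))

-- ===== PORT B =====
-- B's loop over the comma-split fragments: acc = frags[:k] already consumed, net = running paren balance;
-- when net hits 0 after a fragment followed by a comma, join back and strip. Exhaustion = ValueError → ([],[]).
def splitArgsGoB (acc : List (List Char)) (net : Int) : List (List Char) → List Char × List Char
  | [] => ([], [])
  | [_] => ([], [])
  | f :: g :: rest =>
    let net' := net + (PySem.Chars.count f ['('] : Int) - (PySem.Chars.count f [')'] : Int)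
    if net' = 0 then
      (PySem.Chars.join [','] (acc ++ [f]), PySem.Chars.join [','] (g :: rest))
    else splitArgsGoB (acc ++ [f]) net' (g :: rest)

def split_args_py_alt (s : String) : String × String :=
  let frags := PySem.Chars.splitOn s.toList [',']
  let pq := splitArgsGoB [] 0 frags
  (String.ofList (PySem.Chars.strip pq.1), String.ofList (PySem.Chars.strip pq.2))

-- ===== PRECONDITION & SPEC =====
-- Pre_ excludes exactly the inputs with no comma at parenthesis depth 0, on which the Python A
-- (and the Python B) raises ValueError.
def Pre_split_args_py (s : String) : Prop :=
  ∃ i, ∃ _ : i < s.toList.length,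
    s.toList[i]! = ',' ∧ ((s.toList.take i).count '(' : Int) = (s.toList.take i).count ')'
instance (s : String) : Decidable (Pre_split_args_py s) := by unfold Pre_split_args_py; infer_instance
def pvWitness_split_args_py : String := "f(a,b), g"
def Spec_split_args_py (s : String) (out : String × String) : Prop := out = split_args_py_alt s
instance (s : String) (out : String × String) : Decidable (Spec_split_args_py s out) := by unfold Spec_split_args_py; infer_instance

-- ===== CLAIM (what is proved, stated in full; the proofs are below) =====
def Claim_equal_split_args_py : Prop := ∀ (s : String), Dom_split_args_py s → Pre_split_args_py s → Spec_split_args_py s (split_args_py s)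

-- ===== LEMMAS AND PROOFS =====

-- Common specification: first top-level comma split of the raw (unstripped) halves.
def scanSpec : List Char → Int → Option (List Char × List Char)
  | [], _ => none
  | c :: t, d =>
    if c = '(' then (scanSpec t (d+1)).map (fun pq => (c :: pq.1, pq.2))
    else if c = ')' then (scanSpec t (d-1)).map (fun pq => (c :: pq.1, pq.2))
    else if c = ',' ∧ d = 0 then some ([], t)
    else (scanSpec t d).map (fun pq => (c :: pq.1, pq.2))

theorem scan_append (f : List Char) (hf : ',' ∉ f) (rest : List Char) (d : Int) :
    scanSpec (f ++ rest) d
      = (scanSpec rest (d + ((f.count '(' : Int) - (f.count ')' : Int)))).map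
          (fun pq => (f ++ pq.1, pq.2)) := by
  induction f generalizing d with
  | nil => simp [scanSpec]
  | cons c t ih =>
    have hc : c ≠ ',' := fun h => hf (h ▸ List.mem_cons_self)
    have ht : ',' ∉ t := fun h => hf (List.mem_cons_of_mem _ h)
    have hmap : ∀ (X : Option (List Char × List Char)),
        Option.map (fun pq => (c :: pq.1, pq.2)) (Option.map (fun pq => (t ++ pq.1, pq.2)) X)
          = Option.map (fun pq => ((c :: t) ++ pq.1, pq.2)) X := by
      intro X; cases X <;> rfl
    by_cases h1 : c = '('
    · subst h1
      simp only [List.cons_append, scanSpec, if_pos rfl, ih ht, hmap]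
      congr 2
      simp [List.count_cons]
      push_cast
      ring
    · by_cases h2 : c = ')'
      · subst h2
        simp only [List.cons_append, scanSpec, if_neg h1, if_pos rfl, ih ht, hmap]
        congr 2
        simp [List.count_cons, h1]
        push_cast
        ring
      · simp only [List.cons_append, scanSpec, if_neg h1, if_neg h2]
        rw [if_neg (by exact fun h => hc h.1)]
        rw [ih ht, hmap]
        congr 2
        simp [List.count_cons, h1, h2]

theorem scan_none (f : List Char) (hf : ',' ∉ f) (d : Int) : scanSpec f d = none := by
  have := scan_append f hf [] d
  simpa [scanSpec] using this

theorem join_cons_ne (x : List Char) (l : List (List Char)) (h : l ≠ []) :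
    PySem.Chars.join [','] (x :: l) = x ++ ',' :: PySem.Chars.join [','] l := by
  cases l with
  | nil => exact absurd rfl h
  | cons b t => rw [PySem.Chars.join_cons_cons]; simp

theorem join_append_single (acc : List (List Char)) (y : List Char) :
    PySem.Chars.join [','] (acc ++ [y])
      = if acc = [] then y else PySem.Chars.join [','] acc ++ ',' :: y := by
  induction acc with
  | nil => simp [PySem.Chars.join_singleton]
  | cons a t ih =>
    by_cases ht : t = []
    · subst ht
      simp [join_cons_ne a [y] (by simp), PySem.Chars.join_singleton]
    · rw [List.cons_append, join_cons_ne a (t ++ [y]) (by simp), ih, if_neg ht,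
          if_neg (by simp), join_cons_ne a t ht]
      simp

theorem count_go_single (c : Char) (fuel : Nat) (l : List Char) (acc : Nat)
    (hfuel : l.length ≤ fuel) :
    PySem.Chars.count.go [c] fuel l acc = acc + l.count c := by
  induction fuel generalizing l acc with
  | zero =>
    cases l with
    | nil => simp [PySem.Chars.count.go]
    | cons x t => simp at hfuel
  | succ n ih =>
    cases l with
    | nil => simp [PySem.Chars.count.go]
    | cons x t =>
      simp only [PySem.Chars.count.go]
      by_cases hx : c = x
      · rw [if_pos (by simp [List.isPrefixOf, hx])]
        rw [show List.drop [c].length (x :: t) = t from rfl]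
        rw [ih t (acc+1) (by simpa using Nat.le_of_succ_le_succ hfuel)]
        simp [List.count_cons, hx]
        omega
      · rw [if_neg (by simp [List.isPrefixOf, hx])]
        rw [ih t acc (by simpa using Nat.le_of_succ_le_succ hfuel)]
        simp [List.count_cons, Ne.symm hx, hx]


theorem chars_count_single (l : List Char) (c : Char) :
    PySem.Chars.count l [c] = l.count c := by
  have h := count_go_single c l.length l 0 le_rfl
  simp [PySem.Chars.count, h]

-- Chars.splitOn with a single-character separator is List.splitOn (fuel induction).

theorem modifyHead_id_eq {α : Type} (L : List α) : List.modifyHead (fun x => x) L = L := by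
  cases L <;> rfl

theorem splitOn_go_single (c : Char) (fuel : Nat) (l cur : List Char)
    (acc : List (List Char)) (hfuel : l.length ≤ fuel) :
    PySem.Chars.splitOn.go [c] fuel l cur acc
      = acc.reverse ++ (l.splitOn c).modifyHead (cur.reverse ++ ·) := by
  induction fuel generalizing l cur acc with
  | zero =>
    cases l with
    | nil => simp [PySem.Chars.splitOn.go, List.splitOn, List.splitOnP, List.splitOnP.go]
    | cons x t => simp at hfuel
  | succ n ih =>
    cases l with
    | nil => simp [PySem.Chars.splitOn.go, List.splitOn, List.splitOnP, List.splitOnP.go]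
    | cons x t =>
      simp only [PySem.Chars.splitOn.go]
      by_cases hx : c = x
      · rw [if_pos (by simp [List.isPrefixOf, hx])]
        rw [show List.drop [c].length (x :: t) = t by simp]
        rw [ih t [] (cur.reverse :: acc) (by simpa using Nat.le_of_succ_le_succ hfuel)]
        subst hx
        simp only [List.splitOn, List.splitOnP_cons, beq_self_eq_true, if_pos]
        simp [modifyHead_id_eq]
      · rw [if_neg (by simp [List.isPrefixOf, hx])]
        rw [ih t (x :: cur) acc (by simpa using Nat.le_of_succ_le_succ hfuel)]
        simp only [List.splitOn] at *
        rw [List.splitOnP_cons]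
        rw [if_neg (by simp [Ne.symm hx])]
        rw [List.modifyHead_modifyHead]
        cases List.splitOnP (fun y => y == c) t <;> simp

theorem splitOn_single (cs : List Char) (c : Char) :
    PySem.Chars.splitOn cs [c] = cs.splitOn c := by
  rw [PySem.Chars.splitOn, splitOn_go_single c (cs.length + 1) cs [] [] (by omega)]
  simp [modifyHead_id_eq]

theorem mem_splitOn_not_mem (cs : List Char) (c : Char) :
    ∀ l ∈ cs.splitOn c, c ∉ l := by
  induction cs with
  | nil =>
    intro l hl
    simp [List.splitOn, List.splitOnP, List.splitOnP.go] at hl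
    simp [hl]
  | cons x t ih =>
    intro l hl
    simp only [List.splitOn, List.splitOnP_cons] at hl ih
    by_cases hx : x = c
    · rw [if_pos (by simp [hx])] at hl
      rcases List.mem_cons.mp hl with h | h
      · simp [h]
      · exact ih l h
    · rw [if_neg (by simp [hx])] at hl
      obtain ⟨h0, t0, ht0⟩ := List.exists_cons_of_ne_nil (List.splitOnP_ne_nil _ t)
      rw [ht0] at hl
      rcases List.mem_cons.mp hl with h | h
      · subst h
        intro hmem
        rcases List.mem_cons.mp hmem with h | h
        · exact hx h.symm
        · exact ih h0 (ht0 ▸ List.mem_cons_self) h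
      · exact ih l (ht0 ▸ List.mem_cons_of_mem _ h)

-- ===== VERDICT (by name: the statement is the Claim_ definition above) =====

theorem goB_spec (fs : List (List Char)) (hne : fs ≠ []) (hf : ∀ f ∈ fs, ',' ∉ f)
    (acc : List (List Char)) (net : Int) :
    splitArgsGoB acc net fs
      = match scanSpec (PySem.Chars.join [','] fs) net with
        | none => ([], [])
        | some pq => (PySem.Chars.join [','] (acc ++ [pq.1]), pq.2) := by
  induction fs generalizing acc net with
  | nil => exact absurd rfl hne
  | cons f rest ih =>
    have hfc : ',' ∉ f := hf f List.mem_cons_self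
    cases rest with
    | nil =>
      simp [splitArgsGoB, PySem.Chars.join_singleton, scan_none f hfc]
    | cons g rest' =>
      rw [PySem.Chars.join_cons_cons]
      rw [show f ++ [','] ++ PySem.Chars.join [','] (g :: rest')
            = f ++ (',' :: PySem.Chars.join [','] (g :: rest')) by simp]
      rw [scan_append f hfc]
      rw [show net + (((f.count '(' : Int)) - ((f.count ')' : Int)))
            = net + ((f.count '(' : Int)) - ((f.count ')' : Int)) by ring]
      set net' := net + ((f.count '(' : Int)) - ((f.count ')' : Int)) with hnet'
      by_cases h0 : net' = 0
      · have : scanSpec (',' :: PySem.Chars.join [','] (g :: rest')) net'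
            = some ([], PySem.Chars.join [','] (g :: rest')) := by
          simp [scanSpec, h0]
        rw [this]
        simp only [splitArgsGoB, chars_count_single]
        rw [if_pos (by rw [← hnet']; exact h0)]
        simp
      · have : scanSpec (',' :: PySem.Chars.join [','] (g :: rest')) net'
            = (scanSpec (PySem.Chars.join [','] (g :: rest')) net').map
                (fun pq => (',' :: pq.1, pq.2)) := by
          simp [scanSpec, h0]
        rw [this]
        have hstep : splitArgsGoB acc net (f :: g :: rest')
            = splitArgsGoB (acc ++ [f]) net' (g :: rest') := by
          simp only [splitArgsGoB, chars_count_single]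
          rw [if_neg (by rw [← hnet']; exact h0)]
        rw [hstep, ih (by simp) (fun x hx => hf x (List.mem_cons_of_mem _ hx))]
        cases hs : scanSpec (PySem.Chars.join [','] (g :: rest')) net' with
        | none => simp
        | some pq =>
          simp only [Option.map_some]
          rw [join_append_single (acc ++ [f]) pq.1,
              join_append_single acc (f ++ ',' :: pq.1)]
          rw [join_append_single acc f]
          by_cases ha : acc = [] <;> simp [ha]

theorem goA_spec (cs : List Char) (rest : List Char) (i : Nat) (d : Int)
    (hdrop : cs.drop i = rest) :
    splitArgsGoA cs i d rest
      = match scanSpec rest d with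
        | none => ([], [])
        | some pq => (cs.take i ++ pq.1, pq.2) := by
  induction rest generalizing i d with
  | nil => simp [splitArgsGoA, scanSpec]
  | cons c t ih =>
    have hi : i < cs.length := by
      by_contra h
      rw [List.drop_eq_nil_of_le (le_of_not_gt h)] at hdrop
      exact List.cons_ne_nil _ _ hdrop.symm
    have hget : cs[i]'hi = c := by
      have h0 : (cs.drop i)[0]'(by simp [hdrop]) = c := by simp [hdrop]
      rw [List.getElem_drop] at h0
      simpa using h0
    have hdrop1 : cs.drop (i+1) = t := by
      have h1 := congrArg (List.drop 1) hdrop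
      rw [List.drop_drop] at h1
      simpa [Nat.add_comm] using h1
    have htake1 : cs.take (i+1) = cs.take i ++ [c] := by
      rw [List.take_succ]
      simp [List.getElem?_eq_getElem hi, hget]
    by_cases h1 : c = '('
    · rw [show splitArgsGoA cs i d (c :: t) = splitArgsGoA cs (i+1) (d+1) t by
        simp [splitArgsGoA, h1]]
      rw [ih (i+1) (d+1) hdrop1]
      subst h1
      simp only [scanSpec, if_pos rfl]
      cases scanSpec t (d+1) with
      | none => simp
      | some pq => simp [htake1]
    · by_cases h2 : c = ')'
      · rw [show splitArgsGoA cs i d (c :: t) = splitArgsGoA cs (i+1) (d-1) t by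
          simp [splitArgsGoA, h1, h2]]
        rw [ih (i+1) (d-1) hdrop1]
        subst h2
        simp only [scanSpec, if_neg h1, if_pos rfl]
        cases scanSpec t (d-1) with
        | none => simp
        | some pq => simp [htake1]
      · by_cases h3 : c = ',' ∧ d = 0
        · rw [show splitArgsGoA cs i d (c :: t)
              = (PySem.List.slice cs none (some (i : Int)),
                 PySem.List.slice cs (some ((i : Int)+1)) none) by
            simp [splitArgsGoA, h1, h2, h3]]
          simp only [scanSpec, if_neg h1, if_neg h2, if_pos h3]
          rw [PySem.List.slice_to cs (by positivity)]
          rw [show ((i : Int)+1) = ((i+1 : Nat) : Int) by push_cast; ring]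
          rw [PySem.List.slice_from cs (by positivity)]
          simp [hdrop1]
        · rw [show splitArgsGoA cs i d (c :: t) = splitArgsGoA cs (i+1) d t by
            simp [splitArgsGoA, h1, h2, h3]]
          rw [ih (i+1) d hdrop1]
          simp only [scanSpec, if_neg h1, if_neg h2, if_neg h3]
          cases scanSpec t d with
          | none => simp
          | some pq => simp [htake1]

-- Chars.count with a single-character needle is List.count (fuel induction).
theorem split_args_py_spec : Claim_equal_split_args_py := by
  intro s _ _
  unfold Spec_split_args_py split_args_py split_args_py_alt
  have hsplit : PySem.Chars.splitOn s.toList [','] = s.toList.splitOn ',' :=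
    splitOn_single s.toList ','
  have hne : s.toList.splitOn ',' ≠ [] := List.splitOnP_ne_nil _ _
  have hmem : ∀ f ∈ s.toList.splitOn ',', ',' ∉ f := mem_splitOn_not_mem s.toList ','
  have hjoin : PySem.Chars.join [','] (s.toList.splitOn ',') = s.toList := by
    simpa [PySem.Chars.join] using List.intercalate_splitOn (xs := s.toList) ','
  have hB := goB_spec (s.toList.splitOn ',') hne hmem [] 0
  rw [hjoin] at hB
  have hA := goA_spec s.toList s.toList 0 0 (by simp)
  simp only [hsplit, hA, hB]
  cases hs : scanSpec s.toList 0 with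
  | none => simp
  | some pq => simp [PySem.Chars.join_singleton]
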